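-- pv_equiv track=rewrite | github.com/RideGreg/LeetCode | Python/5366.py | MaxPeopleNumber
-- ===== SOURCE A (Python) =====
-- def MaxPeopleNumber(height):
--     def divide(m):
--         ans = 0
--         for x in groups:
--             ans += x // m
--             if ans >= m:
--                 return True
--         return ans >= m
--     height.sort()
--     groups = [1]
--     for i in range(1, len(height)):
--         if height[i] - height[i-1] <= 2:
--             groups[-1] += 1
--         else:
--             groups.append(1)
--     l, r = 1, max(groups)
--     while l < r:
--         m = (l+r+1) // 2
--         if divide(m):
--             l = m
--         else:
--             r = m - 1
--     return l**2
-- ===== SOURCE B (Python) =====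
-- def MaxPeopleNumber(height):
--     # same sort-then-group phase as A (height is sorted in place)
--     height.sort()
--     groups = [1]
--     for i in range(1, len(height)):
--         if height[i] - height[i-1] <= 2:
--             groups[-1] += 1
--         else:
--             groups.append(1)
--     # linear scan: largest m (from max(groups) down) with sum(x // m) >= m
--     m = max(groups)
--     while sum(x // m for x in groups) < m:
--         m -= 1
--     return m * m
-- ===== Notes on version B (the rewrite author's own statement) =====
-- stated objective: simpler
-- what changed: The early-return divide() helper plus binary search over m is replaced by an inline feasibility sum and a plain linear scan from max(groups) downward returning the first feasible m squared; the sort-then-group phase is unchanged.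
import Mathlib
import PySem

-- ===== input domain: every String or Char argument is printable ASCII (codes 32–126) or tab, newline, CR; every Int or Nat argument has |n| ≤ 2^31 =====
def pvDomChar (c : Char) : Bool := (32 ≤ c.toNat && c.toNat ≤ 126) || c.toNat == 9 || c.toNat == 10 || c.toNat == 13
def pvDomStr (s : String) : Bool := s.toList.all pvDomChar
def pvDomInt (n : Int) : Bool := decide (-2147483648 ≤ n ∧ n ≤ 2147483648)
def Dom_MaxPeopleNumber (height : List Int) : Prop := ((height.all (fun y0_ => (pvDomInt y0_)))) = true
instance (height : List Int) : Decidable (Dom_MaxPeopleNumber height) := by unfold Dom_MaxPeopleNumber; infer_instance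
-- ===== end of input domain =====

-- B replaces A's early-return helper + binary search by an inline-sum linear scan from max(groups)
-- downward (simpler); the sort-then-group phase is the same in both. Note: both Pythons sort
-- `height` in place; the equivalence proved here is about the return value.


-- ===== PORT A =====
-- groups[-1] += 1 on a nonempty list
def bumpLast : List Int → List Int
  | [] => []
  | [x] => [x + 1]
  | x :: y :: t => x :: bumpLast (y :: t)

-- the sort-then-group loop, identical in both Pythons (shared helper);
-- indices i and i-1 are always in range here, so pyGetD is exact
def buildGroups (hs : List Int) : List Int :=
  (PySem.List.pyRange 1 (hs.length : Int) 1).foldl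
    (fun gs i =>
      if PySem.List.pyGetD hs i 0 - PySem.List.pyGetD hs (i - 1) 0 ≤ 2 then bumpLast gs
      else gs ++ [1]) [1]

-- A's `divide(m)`: running sum with early `return True`
def divideLoop (gs : List Int) (ans m : Int) : Bool :=
  match gs with
  | [] => decide (ans ≥ m)
  | x :: t =>
    let a := ans + PySem.Int.floordiv x m
    if a ≥ m then true else divideLoop t a m

-- A's `while l < r` binary search (termination measure (r-l).toNat)
def bsearch (gs : List Int) (l r : Int) : Int :=
  if h : l < r then
    if divideLoop gs 0 (PySem.Int.floordiv (l + r + 1) 2) then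
      bsearch gs (PySem.Int.floordiv (l + r + 1) 2) r
    else bsearch gs l (PySem.Int.floordiv (l + r + 1) 2 - 1)
  else l
termination_by (r - l).toNat
decreasing_by
  · have hb := PySem.Int.floordiv_two_mid_bounds (lo := l + 1) (hi := r) (by omega)
    rw [show l + 1 + r = l + r + 1 by ring] at hb
    omega
  · have hb := PySem.Int.floordiv_two_mid_bounds (lo := l + 1) (hi := r) (by omega)
    rw [show l + 1 + r = l + r + 1 by ring] at hb
    omega

def MaxPeopleNumber (height : List Int) : Int :=
  let s := PySem.List.sorted height (fun x => x) false
  let gs := buildGroups s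
  -- groups is never empty, so Python's max never raises; getD 0 is exact
  (bsearch gs 1 ((PySem.List.max? gs (fun x => x)).getD 0)) ^ 2

-- ===== PORT B =====
-- sum(x // m for x in groups)
def sumdiv (gs : List Int) (m : Int) : Int := (gs.map (fun x => PySem.Int.floordiv x m)).sum

-- B's `while sum(...) < m: m -= 1`; the `0 < m` guard only makes the recursion total
-- (the Python loop always stops by m = 1, where the sum is ≥ 1)
def scanDown (gs : List Int) (m : Int) : Int :=
  if h : 0 < m ∧ sumdiv gs m < m then scanDown gs (m - 1) else m * m
termination_by m.toNat
decreasing_by omega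

def MaxPeopleNumber_alt (height : List Int) : Int :=
  let s := PySem.List.sorted height (fun x => x) false
  let gs := buildGroups s
  scanDown gs ((PySem.List.max? gs (fun x => x)).getD 0)

-- ===== PRECONDITION & SPEC =====
def Spec_MaxPeopleNumber (height : List Int) (out : Int) : Prop := out = MaxPeopleNumber_alt height
instance (height : List Int) (out : Int) : Decidable (Spec_MaxPeopleNumber height out) := by unfold Spec_MaxPeopleNumber; infer_instance

-- ===== CLAIM (what is proved, stated in full; the proofs are below) =====
def Claim_equal_MaxPeopleNumber : Prop := ∀ (height : List Int), Dom_MaxPeopleNumber height → Spec_MaxPeopleNumber height (MaxPeopleNumber height)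

-- ===== LEMMAS AND PROOFS =====

-- groups lists are nonempty with all entries ≥ 1
def Good (gs : List Int) : Prop := gs ≠ [] ∧ ∀ g ∈ gs, 1 ≤ g

-- feasibility: sum(x // m for x in groups) ≥ m
def Feas (gs : List Int) (m : Int) : Prop := m ≤ sumdiv gs m

theorem bumpLast_good (gs : List Int) (h : Good gs) : Good (bumpLast gs) := by
  obtain ⟨hne, hg⟩ := h
  induction gs with
  | nil => exact absurd rfl hne
  | cons x t ih =>
    cases t with
    | nil =>
      refine ⟨by simp [bumpLast], ?_⟩
      intro g hgm
      simp [bumpLast] at hgm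
      have := hg x (by simp)
      omega
    | cons y s =>
      have hrec := ih (by simp) (fun g hgm => hg g (by simp at hgm ⊢; tauto))
      refine ⟨by simp [bumpLast], ?_⟩
      intro g hgm
      simp only [bumpLast, List.mem_cons] at hgm
      rcases hgm with rfl | hm
      · exact hg g (by simp)
      · exact hrec.2 g hm

theorem buildGroups_good (hs : List Int) : Good (buildGroups hs) := by
  unfold buildGroups
  generalize PySem.List.pyRange 1 (hs.length : Int) 1 = L
  have key : ∀ (L : List Int) (acc : List Int), Good acc →
      Good (L.foldl (fun gs i =>
        if PySem.List.pyGetD hs i 0 - PySem.List.pyGetD hs (i - 1) 0 ≤ 2 then bumpLast gs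
        else gs ++ [1]) acc) := by
    intro L
    induction L with
    | nil => intro acc h; exact h
    | cons i t ih =>
      intro acc h
      simp only [List.foldl_cons]
      apply ih
      split
      · exact bumpLast_good acc h
      · refine ⟨by simp, ?_⟩
        intro g hgm
        rcases List.mem_append.mp hgm with hm | hm
        · exact h.2 g hm
        · simp at hm; omega
  exact key L [1] ⟨by simp, by simp⟩

theorem sumdiv_nonneg (gs : List Int) (m : Int) (hm : 0 < m) (hg : ∀ g ∈ gs, 1 ≤ g) :
    0 ≤ sumdiv gs m := by
  apply List.sum_nonneg
  intro x hx
  simp only [List.mem_map] at hx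
  obtain ⟨y, hy, rfl⟩ := hx
  rw [PySem.Int.floordiv_eq_ediv_of_pos hm]
  exact Int.ediv_nonneg (by have := hg y hy; omega) hm.le

theorem sumdiv_cons (x : Int) (t : List Int) (m : Int) :
    sumdiv (x :: t) m = PySem.Int.floordiv x m + sumdiv t m := by
  simp [sumdiv]

theorem divideLoop_iff (gs : List Int) (m : Int) (hm : 0 < m) (hg : ∀ g ∈ gs, 1 ≤ g) :
    ∀ ans, (divideLoop gs ans m = true ↔ m ≤ ans + sumdiv gs m) := by
  induction gs with
  | nil =>
    intro ans
    simp only [divideLoop, sumdiv, List.map_nil, List.sum_nil, decide_eq_true_eq, ge_iff_le]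
    omega
  | cons x t ih =>
    intro ans
    have hx := hg x (by simp)
    have hdiv0 : 0 ≤ PySem.Int.floordiv x m := by
      rw [PySem.Int.floordiv_eq_ediv_of_pos hm]
      exact Int.ediv_nonneg (by omega) hm.le
    have hrest : 0 ≤ sumdiv t m := sumdiv_nonneg t m hm (fun g h => hg g (by simp [h]))
    rw [sumdiv_cons]
    simp only [divideLoop]
    split
    · simp only [true_iff]
      omega
    · rw [ih (fun g h => hg g (by simp [h])) (ans + PySem.Int.floordiv x m)]
      constructor <;> intro <;> omega

theorem sumdiv_antitone (gs : List Int) (m m' : Int) (h1 : 0 < m') (h2 : m' ≤ m)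
    (hg : ∀ g ∈ gs, 1 ≤ g) : sumdiv gs m ≤ sumdiv gs m' := by
  unfold sumdiv
  apply List.sum_le_sum
  intro x hx
  have hx1 := hg x hx
  have hm : (0:Int) < m := by omega
  rw [PySem.Int.floordiv_eq_ediv_of_pos hm, PySem.Int.floordiv_eq_ediv_of_pos h1,
    Int.le_ediv_iff_mul_le h1]
  calc x / m * m' ≤ x / m * m := by
        exact mul_le_mul_of_nonneg_left h2 (Int.ediv_nonneg (by omega) hm.le)
    _ ≤ x := Int.ediv_mul_le x (ne_of_gt hm)

theorem feas_down (gs : List Int) (m m' : Int) (h1 : 0 < m') (h2 : m' ≤ m)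
    (hg : ∀ g ∈ gs, 1 ≤ g) (hf : Feas gs m) : Feas gs m' := by
  have := sumdiv_antitone gs m m' h1 h2 hg
  unfold Feas at *
  omega

theorem feas_one (gs : List Int) (h : Good gs) : Feas gs 1 := by
  obtain ⟨hne, hg⟩ := h
  have hsum : sumdiv gs 1 = gs.sum := by
    unfold sumdiv
    simp
  cases gs with
  | nil => exact absurd rfl hne
  | cons x t =>
    unfold Feas
    rw [hsum, List.sum_cons]
    have hx := hg x (by simp)
    have ht : 0 ≤ t.sum := List.sum_nonneg (fun g hm => by have := hg g (by simp [hm]); omega)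
    omega

theorem not_feas_above (gs : List Int) (m M : Int) (h : Good gs)
    (hM : PySem.List.max? gs (fun x => x) = some M) (hm : M < m) : ¬ Feas gs m := by
  obtain ⟨hne, hg⟩ := h
  have hmax := PySem.List.max?_isMax hM
  have hMmem := PySem.List.max?_mem hM
  have hM1 : 1 ≤ M := hg M hMmem
  have hmpos : 0 < m := by omega
  have hzero : sumdiv gs m = 0 := by
    unfold sumdiv
    rw [List.sum_eq_zero]
    rintro p hp
    simp only [List.mem_map] at hp
    obtain ⟨x, hx, rfl⟩ := hp
    rw [PySem.Int.floordiv_eq_ediv_of_pos hmpos]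
    exact Int.ediv_eq_zero_of_lt (by have := hg x hx; omega) (by have := hmax x hx; omega)
  unfold Feas
  omega

-- the value both searches compute: the greatest feasible m
def Crit (gs : List Int) (u : Int) : Prop := 1 ≤ u ∧ Feas gs u ∧ ¬ Feas gs (u + 1)

theorem crit_unique (gs : List Int) (u v : Int) (hg : ∀ g ∈ gs, 1 ≤ g)
    (hu : Crit gs u) (hv : Crit gs v) : u = v := by
  have hu1 := hu.1
  have hv1 := hv.1
  rcases lt_trichotomy u v with hlt | heq | hgt
  · exact absurd (feas_down gs v (u + 1) (by omega) (by omega) hg hv.2.1) (by exact hu.2.2)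
  · exact heq
  · exact absurd (feas_down gs u (v + 1) (by omega) (by omega) hg hu.2.1) (by exact hv.2.2)

theorem bsearch_crit (gs : List Int) (hg : ∀ g ∈ gs, 1 ≤ g) :
    ∀ n l r, (r - l).toNat = n → 1 ≤ l → l ≤ r → Feas gs l → ¬ Feas gs (r + 1) →
      Crit gs (bsearch gs l r) := by
  intro n
  induction n using Nat.strong_induction_on with
  | _ n IH =>
    intro l r hn h1 hlr hFl hFr
    rw [bsearch]
    split
    · rename_i hlt
      have hb := PySem.Int.floordiv_two_mid_bounds (lo := l + 1) (hi := r) (by omega)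
      rw [show l + 1 + r = l + r + 1 by ring] at hb
      have hd := divideLoop_iff gs (PySem.Int.floordiv (l + r + 1) 2) (by omega) hg 0
      split
      · rename_i hdl
        apply IH ((r - PySem.Int.floordiv (l + r + 1) 2).toNat) (by omega) _ _ rfl (by omega) (by omega) _ hFr
        have := hd.mp hdl
        unfold Feas
        omega
      · rename_i hdl
        apply IH ((PySem.Int.floordiv (l + r + 1) 2 - 1 - l).toNat) (by omega) _ _ rfl h1 (by omega) hFl
        rw [show PySem.Int.floordiv (l + r + 1) 2 - 1 + 1 = PySem.Int.floordiv (l + r + 1) 2 by ring]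
        intro hf
        exact hdl (hd.mpr (by unfold Feas at hf; omega))
    · rename_i hge
      have : l = r := by omega
      subst this
      exact ⟨h1, hFl, hFr⟩

theorem scanDown_eq (gs : List Int) (u : Int) (hg : ∀ g ∈ gs, 1 ≤ g) (hu : Crit gs u) :
    ∀ n m, m.toNat = n → 1 ≤ m → ¬ Feas gs (m + 1) → u ≤ m → scanDown gs m = u * u := by
  intro n
  induction n using Nat.strong_induction_on with
  | _ n IH =>
    intro m hn h1 hFm1 hum
    rw [scanDown]
    split
    · rename_i hc
      have hnF : ¬ Feas gs m := by unfold Feas; omega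
      have hne : u ≠ m := fun he => hnF (he ▸ hu.2.1)
      have h1' : 1 ≤ m - 1 := by have := hu.1; omega
      apply IH (m - 1).toNat (by omega) _ rfl h1' _ (by omega)
      rw [show m - 1 + 1 = m by ring]
      exact hnF
    · rename_i hc
      have hF : Feas gs m := by unfold Feas at *; omega
      have : u = m := crit_unique gs u m hg hu ⟨h1, hF, hFm1⟩
      rw [this]

theorem core_eq (gs : List Int) (h : Good gs) :
    (bsearch gs 1 ((PySem.List.max? gs (fun x => x)).getD 0)) ^ 2
      = scanDown gs ((PySem.List.max? gs (fun x => x)).getD 0) := by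
  obtain ⟨hne, hg⟩ := h
  obtain ⟨M, hM⟩ : ∃ M, PySem.List.max? gs (fun x => x) = some M := by
    cases hh : PySem.List.max? gs (fun x => x) with
    | none => exact absurd ((PySem.List.max?_eq_none_iff gs fun x => x).mp hh) hne
    | some M => exact ⟨M, rfl⟩
  rw [hM]
  simp only [Option.getD_some]
  have hM1 : 1 ≤ M := hg M (PySem.List.max?_mem hM)
  have hnFtop : ¬ Feas gs (M + 1) := not_feas_above gs (M + 1) M ⟨hne, hg⟩ hM (by omega)
  have hcrit : Crit gs (bsearch gs 1 M) :=
    bsearch_crit gs hg _ 1 M rfl le_rfl hM1 (feas_one gs ⟨hne, hg⟩) hnFtop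
  have huM : bsearch gs 1 M ≤ M := by
    by_contra hlt
    exact (not_feas_above gs (bsearch gs 1 M) M ⟨hne, hg⟩ hM (by omega)) hcrit.2.1
  rw [scanDown_eq gs (bsearch gs 1 M) hg hcrit M.toNat M rfl hM1 hnFtop huM]
  ring

-- ===== VERDICT (by name: the statement is the Claim_ definition above) =====
theorem MaxPeopleNumber_spec : Claim_equal_MaxPeopleNumber := by
  intro height _
  unfold Spec_MaxPeopleNumber
  simp only [MaxPeopleNumber, MaxPeopleNumber_alt]
  exact core_eq _ (buildGroups_good _)
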